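-- pv_equiv track=rewrite | github.com/Johan-Arul/skylark-ai-agent | Skylark-AI_Agent/agent.py | _was_last_clarification
-- ===== SOURCE A (Python) =====
-- def _was_last_clarification(history: list) -> bool:
--     """Return True if the most recent assistant message was a clarification question."""
--     for msg in reversed(history):
--         if msg.get("role") in ("assistant", "model"):
--             content = msg.get("content", "")
--             # Clarification messages contain these characteristic phrases
--             return (
--                 "do you mean:" in content.lower()
--                 or "could you clarify" in content.lower()
--                 or "when you say" in content.lower()
--                 or "are you asking" in content.lower()
--             )
--     return False
-- ===== SOURCE B (Python) =====
-- _CLARIFICATION_PHRASES = ("do you mean:", "could you clarify", "when you say", "are you asking")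
--
--
-- def _was_last_clarification(history: list) -> bool:
--     """Forward single pass: remember the content of the last assistant/model message."""
--     last_content = None
--     for msg in history:
--         if msg.get("role") in ("assistant", "model"):
--             last_content = msg.get("content", "")
--     if last_content is None:
--         return False
--     low = last_content.lower()
--     return any(phrase in low for phrase in _CLARIFICATION_PHRASES)
-- ===== Notes on version B (the rewrite author's own statement) =====
-- stated objective: alternative
-- what changed: Replaces the reverse scan with early return by a forward fold that keeps the last assistant/model message's content, and folds the four hard-coded substring tests into any() over a phrase tuple.
import Mathlib
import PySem

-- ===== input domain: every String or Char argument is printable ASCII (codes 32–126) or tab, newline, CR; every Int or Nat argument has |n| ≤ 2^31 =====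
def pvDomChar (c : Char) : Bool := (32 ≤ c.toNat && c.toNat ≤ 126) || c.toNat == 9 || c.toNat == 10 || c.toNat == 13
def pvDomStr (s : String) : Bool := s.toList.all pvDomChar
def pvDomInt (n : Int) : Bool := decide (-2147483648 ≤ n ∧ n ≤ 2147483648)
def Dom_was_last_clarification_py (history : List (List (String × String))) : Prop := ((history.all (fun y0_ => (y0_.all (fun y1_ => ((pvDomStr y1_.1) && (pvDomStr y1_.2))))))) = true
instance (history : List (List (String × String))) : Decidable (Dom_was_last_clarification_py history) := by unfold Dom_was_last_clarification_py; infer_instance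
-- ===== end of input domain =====

-- B replaces A's reverse scan with early exit by a forward fold keeping the last
-- assistant/model content, then one any() over the phrase list (alternative decomposition, same cost).

-- ===== PORT A =====
def pvRoleOk (msg : List (String × String)) : Bool :=
  match PySem.Dict.get? (PySem.Dict.mk msg) "role" with
  | some r => r == "assistant" || r == "model"
  | none => false

def pvCheckA (content : String) : Bool :=
  PySem.Str.isIn "do you mean:" (PySem.Str.lower content)
  || PySem.Str.isIn "could you clarify" (PySem.Str.lower content)
  || PySem.Str.isIn "when you say" (PySem.Str.lower content)
  || PySem.Str.isIn "are you asking" (PySem.Str.lower content)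

-- A iterates reversed(history) and returns at the first assistant/model message.
def pvLoopA : List (List (String × String)) → Bool
  | [] => false
  | msg :: rest =>
    if pvRoleOk msg then pvCheckA (PySem.Dict.getD (PySem.Dict.mk msg) "content" "")
    else pvLoopA rest

def was_last_clarification_py (history : List (List (String × String))) : Bool :=
  pvLoopA history.reverse

-- ===== PORT B =====
def pvPhrases : List String :=
  ["do you mean:", "could you clarify", "when you say", "are you asking"]

def pvStepB (acc : Option String) (msg : List (String × String)) : Option String :=
  if pvRoleOk msg then some (PySem.Dict.getD (PySem.Dict.mk msg) "content" "") else acc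

def was_last_clarification_py_alt (history : List (List (String × String))) : Bool :=
  match history.foldl pvStepB none with
  | none => false
  | some c =>
    let low := PySem.Str.lower c
    pvPhrases.any (fun p => PySem.Str.isIn p low)


-- ===== PRECONDITION & SPEC =====
def Spec_was_last_clarification_py (history : List (List (String × String))) (out : Bool) : Prop := out = was_last_clarification_py_alt history
instance (history : List (List (String × String))) (out : Bool) : Decidable (Spec_was_last_clarification_py history out) := by unfold Spec_was_last_clarification_py; infer_instance

-- ===== CLAIM (what is proved, stated in full; the proofs are below) =====
def Claim_equal_was_last_clarification_py : Prop := ∀ (history : List (List (String × String))), Dom_was_last_clarification_py history → Spec_was_last_clarification_py history (was_last_clarification_py history)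

-- ===== LEMMAS AND PROOFS =====

lemma loopA_find (l : List (List (String × String))) :
    pvLoopA l = match l.find? pvRoleOk with
      | some m => pvCheckA (PySem.Dict.getD (PySem.Dict.mk m) "content" "")
      | none => false := by
  induction l with
  | nil => rfl
  | cons m rest ih =>
    simp only [pvLoopA, List.find?_cons]
    by_cases h : pvRoleOk m = true <;> simp [h, ih]

lemma fold_last (l : List (List (String × String))) (acc : Option String) :
    l.foldl pvStepB acc = match l.reverse.find? pvRoleOk with
      | some m => some (PySem.Dict.getD (PySem.Dict.mk m) "content" "")
      | none => acc := by
  induction l generalizing acc with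
  | nil => rfl
  | cons m rest ih =>
    simp only [List.foldl_cons, List.reverse_cons, List.find?_append, ih]
    cases rest.reverse.find? pvRoleOk with
    | some m' => simp
    | none =>
      simp only [List.find?_cons, Option.none_or, pvStepB]
      by_cases h : pvRoleOk m = true <;> simp [h]

lemma any_eq_checkA (c : String) :
    (pvPhrases.any fun p => PySem.Str.isIn p (PySem.Str.lower c)) = pvCheckA c := by
  simp [pvPhrases, pvCheckA, Bool.or_assoc]

-- ===== VERDICT (by name: the statement is the Claim_ definition above) =====
theorem was_last_clarification_py_spec : Claim_equal_was_last_clarification_py := by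
  intro history _
  unfold Spec_was_last_clarification_py
  unfold was_last_clarification_py was_last_clarification_py_alt
  rw [loopA_find, fold_last]
  cases history.reverse.find? pvRoleOk with
  | some m => simpa using (any_eq_checkA (PySem.Dict.getD (PySem.Dict.mk m) "content" "")).symm
  | none => rfl
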